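-- pv_equiv track=rewrite | github.com/younhwan97/algorithm-practice | python/COS/COS-3-6-세소수의합.py | solution
-- ===== SOURCE A (Python) =====
-- import math
--
-- def get_primes(n):
--     a = [0] * (n + 1)
--
--     for i in range(2, int(math.sqrt(n)) + 1):
--         if a[i] == 0:
--             for x in range(i + i, n + 1, i):
--                 a[x] = 1
--
--     primes = []
--     for i in range(2, n + 1):
--         if a[i] == 0:
--             primes.append(i)
--     return primes
--
-- def solution(n):
--     primes = get_primes(1000)
--
--     cnt = [[0] * 3000 for _ in range(4)]
--
--     for i in range(len(primes)):
--         cnt[1][primes[i]] = 1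
--
--         for j in range(2, 0, -1):
--             for k in range(3000):
--                 if j == 1 and primes[i] == k:
--                     continue
--
--                 if cnt[j][k] > 0:
--                     cnt[j + 1][k + primes[i]] += cnt[j][k]
--
--     return cnt[3][n]
-- ===== SOURCE B (Python) =====
-- def solution(n):
--     # sieve of Eratosthenes up to 1000
--     sieve = [True] * 1001
--     sieve[0] = False
--     sieve[1] = False
--     for i in range(2, 1001):
--         if sieve[i]:
--             for m in range(i * i, 1001, i):
--                 sieve[m] = False
--     primes = [i for i in range(1001) if sieve[i]]
--
--     # count every strictly increasing triple of primes directly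
--     res = [0] * 3000
--     for i in range(len(primes)):
--         for j in range(i + 1, len(primes)):
--             for k in range(j + 1, len(primes)):
--                 res[primes[i] + primes[j] + primes[k]] += 1
--     return res[n]
-- ===== Notes on version B (the rewrite author's own statement) =====
-- stated objective: simpler
-- what changed: Replaces the layered in-place DP over a 4x3000 count table (rebuilding layer j+1 from layer j for every prime) with a standard sieve plus a direct triple loop over strictly increasing prime triples that increments a single 3000-slot count array.
-- outside the precondition, e.g. on solution(3000): A raises IndexError, B raises IndexError
import Mathlib
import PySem

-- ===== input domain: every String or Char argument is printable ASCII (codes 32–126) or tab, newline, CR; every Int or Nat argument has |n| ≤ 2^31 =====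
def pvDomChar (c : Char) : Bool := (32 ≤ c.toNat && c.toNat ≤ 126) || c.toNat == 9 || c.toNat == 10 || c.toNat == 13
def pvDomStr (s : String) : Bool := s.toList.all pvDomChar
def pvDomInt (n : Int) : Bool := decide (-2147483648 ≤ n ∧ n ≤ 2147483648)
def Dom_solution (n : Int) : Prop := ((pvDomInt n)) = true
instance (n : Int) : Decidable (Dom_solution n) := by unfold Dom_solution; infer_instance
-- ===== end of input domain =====

-- B replaces A's layered in-place DP over a 4x3000 table with a sieve plus a direct
-- triple loop over strictly increasing prime triples into one count array (simpler, same cost).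

-- ===== PORT A =====
-- get_primes(n); int(math.sqrt(n)) is ported as Nat.sqrt, exact for the only call n = 1000.
def getPrimes (n : Int) : List Int :=
  let a0 : List Int := List.replicate (n + 1).toNat 0
  let a := (PySem.List.pyRange 2 ((Nat.sqrt n.toNat : Int) + 1) 1).foldl (fun a i =>
      if PySem.List.pyGetD a i 0 == 0 then
        (PySem.List.pyRange (i + i) (n + 1) i).foldl (fun a x => PySem.List.pySetD a x 1) a
      else a) a0
  (PySem.List.pyRange 2 (n + 1) 1).foldl (fun ps i =>
      if PySem.List.pyGetD a i 0 == 0 then ps ++ [i] else ps) []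

-- the cnt table of solution after the full i/j/k loops (cnt[j][k] reads/writes via pyGetD/pySetD;
-- the write cnt[j+1][k+prime] is only reached with k+prime < 3000, so pySetD is exact here)
-- Python-list indexing / assignment on an Array (identical semantics to
-- PySem.List.pyGetD / pySetD via toList; bridge lemmas pyAGetD_eq / pyASetD_toList below)
def pyAGet? (a : Array Int) (i : Int) : Option Int :=
  (PySem.List.pyIdx? a.size i).bind fun k => a[k]?

def pyAGetD (a : Array Int) (i : Int) (d : Int) : Int := (pyAGet? a i).getD d

def pyASetD (a : Array Int) (i : Int) (v : Int) : Array Int :=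
  ((PySem.List.pyIdx? a.size i).map fun k => a.setIfInBounds k v).getD a

def aCnt : List (Array Int) :=
  let primes := getPrimes 1000
  (PySem.List.pyRange 0 (primes.length : Int) 1).foldl (fun cnt i =>
    (PySem.List.pyRange 2 0 (-1)).foldl (fun cnt j =>
        (PySem.List.pyRange 0 3000 1).foldl (fun cnt k =>
          if j == 1 && PySem.List.pyGetD primes i 0 == k then cnt
          else if pyAGetD (PySem.List.pyGetD cnt j #[]) k 0 > 0 then
            PySem.List.pySetD cnt (j + 1)
              (pyASetD (PySem.List.pyGetD cnt (j + 1) #[]) (k + PySem.List.pyGetD primes i 0)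
                (pyAGetD (PySem.List.pyGetD cnt (j + 1) #[]) (k + PySem.List.pyGetD primes i 0) 0 +
                 pyAGetD (PySem.List.pyGetD cnt j #[]) k 0))
          else cnt) cnt)
      (PySem.List.pySetD cnt 1
        (pyASetD (PySem.List.pyGetD cnt 1 #[]) (PySem.List.pyGetD primes i 0) 1)))
    (List.replicate 4 (Array.replicate 3000 (0 : Int)))

def solution (n : Int) : Int :=
  PySem.List.pyGetD (PySem.List.pyGetD aCnt 3 #[]).toList n 0   -- cnt[3][n]; n in range by Pre_

-- ===== PORT B =====
def bSieve : List Bool :=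
  let s := List.replicate 1001 true
  let s := PySem.List.pySetD s 0 false
  let s := PySem.List.pySetD s 1 false
  (PySem.List.pyRange 2 1001 1).foldl (fun s i =>
    if PySem.List.pyGetD s i false then
      (PySem.List.pyRange (i * i) 1001 i).foldl (fun s m => PySem.List.pySetD s m false) s
    else s) s

def bPrimes : List Int :=
  (PySem.List.pyRange 0 1001 1).foldl (fun ps i =>
    if PySem.List.pyGetD bSieve i false then ps ++ [i] else ps) []

def bTable : Array Int :=
  (PySem.List.pyRange 0 (bPrimes.length : Int) 1).foldl (fun res i =>
    (PySem.List.pyRange (i + 1) (bPrimes.length : Int) 1).foldl (fun res j =>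
      (PySem.List.pyRange (j + 1) (bPrimes.length : Int) 1).foldl (fun res k =>
        pyASetD res
          (PySem.List.pyGetD bPrimes i 0 + PySem.List.pyGetD bPrimes j 0 + PySem.List.pyGetD bPrimes k 0)
          (pyAGetD res
            (PySem.List.pyGetD bPrimes i 0 + PySem.List.pyGetD bPrimes j 0 + PySem.List.pyGetD bPrimes k 0) 0 + 1))
        res) res)
    (Array.replicate 3000 (0 : Int))

def solution_alt (n : Int) : Int :=
  PySem.List.pyGetD bTable.toList n 0   -- res[n]; n in range by Pre_

-- ===== PRECONDITION & SPEC =====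
-- Pre_ excludes exactly the inputs where Python A raises IndexError (cnt[3][n] with n outside [-3000, 3000)).
def Pre_solution (n : Int) : Prop := -3000 ≤ n ∧ n < 3000
instance (n : Int) : Decidable (Pre_solution n) := by unfold Pre_solution; infer_instance
def pvWitness_solution : Int := 10

def Spec_solution (n : Int) (out : Int) : Prop := out = solution_alt n
instance (n : Int) (out : Int) : Decidable (Spec_solution n out) := by unfold Spec_solution; infer_instance

-- ===== CLAIM (what is proved, stated in full; the proofs are below) =====
def Claim_equal_solution : Prop := ∀ (n : Int), Dom_solution n → Pre_solution n → Spec_solution n (solution n)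

-- ===== LEMMAS AND PROOFS =====

-- ---- shared combinatorial layer: increment folds and pair/triple sums ----

-- `res[t] += 1`
def pvInc (res : List Int) (t : Int) : List Int :=
  PySem.List.pySetD res t (PySem.List.pyGetD res t 0 + 1)

-- List models of the two Array tables (the proofs work on these; bridges below)
def aCntL : List (List Int) :=
  let primes := getPrimes 1000
  (PySem.List.pyRange 0 (primes.length : Int) 1).foldl (fun cnt i =>
    (PySem.List.pyRange 2 0 (-1)).foldl (fun cnt j =>
        (PySem.List.pyRange 0 3000 1).foldl (fun cnt k =>
          if j == 1 && PySem.List.pyGetD primes i 0 == k then cnt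
          else if PySem.List.pyGetD (PySem.List.pyGetD cnt j []) k 0 > 0 then
            PySem.List.pySetD cnt (j + 1)
              (PySem.List.pySetD (PySem.List.pyGetD cnt (j + 1) []) (k + PySem.List.pyGetD primes i 0)
                (PySem.List.pyGetD (PySem.List.pyGetD cnt (j + 1) []) (k + PySem.List.pyGetD primes i 0) 0 +
                 PySem.List.pyGetD (PySem.List.pyGetD cnt j []) k 0))
          else cnt) cnt)
      (PySem.List.pySetD cnt 1
        (PySem.List.pySetD (PySem.List.pyGetD cnt 1 []) (PySem.List.pyGetD primes i 0) 1)))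
    (List.replicate 4 (List.replicate 3000 (0 : Int)))

def bTableL : List Int :=
  (PySem.List.pyRange 0 (bPrimes.length : Int) 1).foldl (fun res i =>
    (PySem.List.pyRange (i + 1) (bPrimes.length : Int) 1).foldl (fun res j =>
      (PySem.List.pyRange (j + 1) (bPrimes.length : Int) 1).foldl (fun res k =>
        PySem.List.pySetD res
          (PySem.List.pyGetD bPrimes i 0 + PySem.List.pyGetD bPrimes j 0 + PySem.List.pyGetD bPrimes k 0)
          (PySem.List.pyGetD res
            (PySem.List.pyGetD bPrimes i 0 + PySem.List.pyGetD bPrimes j 0 + PySem.List.pyGetD bPrimes k 0) 0 + 1))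
        res) res)
    (List.replicate 3000 (0 : Int))

-- Array/List bridges
theorem pyAGetD_eq (a : Array Int) (i : Int) (d : Int) :
    pyAGetD a i d = PySem.List.pyGetD a.toList i d := by
  rw [pyAGetD, pyAGet?, PySem.List.pyGetD, PySem.List.pyGet?, Array.length_toList]
  cases h : PySem.List.pyIdx? a.size i with
  | none => rfl
  | some k => simp [Array.getElem?_toList]

theorem pyASetD_toList (a : Array Int) (i : Int) (v : Int) :
    (pyASetD a i v).toList = PySem.List.pySetD a.toList i v := by
  rw [pyASetD, PySem.List.pySetD, PySem.List.pySet?, Array.length_toList]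
  cases h : PySem.List.pyIdx? a.size i with
  | none => rfl
  | some k => simp [Array.toList_setIfInBounds]

theorem pySetD_map {α β : Type} (f : α → β) (xs : List α) (i : Int) (v : α) :
    PySem.List.pySetD (xs.map f) i (f v) = (PySem.List.pySetD xs i v).map f := by
  rw [PySem.List.pySetD, PySem.List.pySetD, PySem.List.pySet?, PySem.List.pySet?,
    List.length_map]
  cases h : PySem.List.pyIdx? xs.length i with
  | none => rfl
  | some k => simp [List.map_set]

theorem bTable_toList : bTable.toList = bTableL := by
  rw [bTable, bTableL,
    show List.replicate 3000 (0 : Int) = (Array.replicate 3000 (0 : Int)).toList by simp]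
  refine (List.foldl_hom Array.toList ?_).symm
  intro res i
  refine (List.foldl_hom Array.toList ?_)
  intro res j
  refine (List.foldl_hom Array.toList ?_)
  intro res k
  rw [pyASetD_toList, pyAGetD_eq]

theorem pyGetD_map_toList (cnt : List (Array Int)) (j : Int) :
    PySem.List.pyGetD (cnt.map Array.toList) j [] = (PySem.List.pyGetD cnt j #[]).toList := by
  have h := PySem.List.pyGetD_map Array.toList cnt j #[]
  simpa using h

theorem aCnt_map_toList : aCnt.map Array.toList = aCntL := by
  rw [aCnt, aCntL,
    show List.replicate 4 (List.replicate 3000 (0 : Int))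
      = (List.replicate 4 (Array.replicate 3000 (0 : Int))).map Array.toList by
        rw [List.map_replicate]; simp]
  refine (List.foldl_hom (List.map Array.toList) ?_).symm
  intro cnt i
  have hinit : PySem.List.pySetD (cnt.map Array.toList) 1
      (PySem.List.pySetD (PySem.List.pyGetD (cnt.map Array.toList) 1 [])
        (PySem.List.pyGetD (getPrimes 1000) i 0) 1)
      = (PySem.List.pySetD cnt 1
          (pyASetD (PySem.List.pyGetD cnt 1 #[]) (PySem.List.pyGetD (getPrimes 1000) i 0) 1)).map
            Array.toList := by
    rw [pyGetD_map_toList, ← pyASetD_toList, pySetD_map]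
  rw [hinit]
  refine (List.foldl_hom (List.map Array.toList) ?_)
  intro cnt j
  refine (List.foldl_hom (List.map Array.toList) ?_)
  intro cnt k
  rw [pyGetD_map_toList cnt j, pyGetD_map_toList cnt (j + 1), ← pyAGetD_eq, ← pyAGetD_eq,
    ← pyAGetD_eq]
  split_ifs with h1 h2
  · rfl
  · rw [pyAGetD_eq, pyAGetD_eq, ← pyASetD_toList, pySetD_map]
  · rfl

-- sums q + r over strictly later r, for pairs drawn left-to-right
def sums2 : List Int → List Int
  | [] => []
  | q :: t => t.map (fun r => q + r) ++ sums2 t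

-- sums p + q + r over pairs q, r drawn from the tail list
def tripsFrom (p : Int) : List Int → List Int
  | [] => []
  | q :: t => t.map (fun r => p + q + r) ++ tripsFrom p t

def sums3 : List Int → List Int
  | [] => []
  | p :: t => tripsFrom p t ++ sums3 t

theorem mem_sums2 {l : List Int} (h : l.Pairwise (· < ·)) {s : Int} (hs : s ∈ sums2 l) :
    ∃ q ∈ l, ∃ r ∈ l, q < r ∧ s = q + r := by
  induction l with
  | nil => simp [sums2] at hs
  | cons q t ih =>
    rw [sums2, List.mem_append] at hs
    rcases hs with hs | hs
    · obtain ⟨r, hr, rfl⟩ := List.mem_map.mp hs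
      exact ⟨q, by simp, r, by simp [hr], (List.pairwise_cons.mp h).1 r hr, rfl⟩
    · obtain ⟨q', hq', r', hr', hlt, rfl⟩ := ih (List.pairwise_cons.mp h).2 hs
      exact ⟨q', by simp [hq'], r', by simp [hr'], hlt, rfl⟩

theorem mem_tripsFrom {p s : Int} {l : List Int} (h : l.Pairwise (· < ·))
    (hs : s ∈ tripsFrom p l) : ∃ q ∈ l, ∃ r ∈ l, q < r ∧ s = p + q + r := by
  induction l with
  | nil => simp [tripsFrom] at hs
  | cons q t ih =>
    rw [tripsFrom, List.mem_append] at hs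
    rcases hs with hs | hs
    · obtain ⟨r, hr, rfl⟩ := List.mem_map.mp hs
      exact ⟨q, by simp, r, by simp [hr], (List.pairwise_cons.mp h).1 r hr, rfl⟩
    · obtain ⟨q', hq', r', hr', hlt, rfl⟩ := ih (List.pairwise_cons.mp h).2 hs
      exact ⟨q', by simp [hq'], r', by simp [hr'], hlt, rfl⟩

theorem mem_sums3 {l : List Int} (h : l.Pairwise (· < ·)) {s : Int} (hs : s ∈ sums3 l) :
    ∃ p ∈ l, ∃ q ∈ l, ∃ r ∈ l, p < q ∧ q < r ∧ s = p + q + r := by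
  induction l with
  | nil => simp [sums3] at hs
  | cons p t ih =>
    rw [sums3, List.mem_append] at hs
    rcases hs with hs | hs
    · obtain ⟨q, hq, r, hr, hlt, rfl⟩ := mem_tripsFrom (List.pairwise_cons.mp h).2 hs
      exact ⟨p, by simp, q, by simp [hq], r, by simp [hr],
        (List.pairwise_cons.mp h).1 q hq, hlt, rfl⟩
    · obtain ⟨p', hp', q', hq', r', hr', h1, h2, rfl⟩ := ih (List.pairwise_cons.mp h).2 hs
      exact ⟨p', by simp [hp'], q', by simp [hq'], r', by simp [hr'], h1, h2, rfl⟩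

theorem sums2_bounds {l : List Int} (h : l.Pairwise (· < ·))
    (hb : ∀ x ∈ l, 2 ≤ x ∧ x ≤ 1000) : ∀ s ∈ sums2 l, 5 ≤ s ∧ s ≤ 1999 := by
  intro s hs
  obtain ⟨q, hq, r, hr, hlt, rfl⟩ := mem_sums2 h hs
  have h1 := hb q hq; have h2 := hb r hr
  omega

theorem sums3_bounds {l : List Int} (h : l.Pairwise (· < ·))
    (hb : ∀ x ∈ l, 2 ≤ x ∧ x ≤ 1000) : ∀ s ∈ sums3 l, 9 ≤ s ∧ s ≤ 2997 := by
  intro s hs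
  obtain ⟨p, hp, q, hq, r, hr, h1, h2, rfl⟩ := mem_sums3 h hs
  have b1 := hb p hp; have b2 := hb q hq; have b3 := hb r hr
  omega

-- snoc recurrences for the pair/triple sum counts
theorem count_sums2_snoc (P : List Int) (p m : Int) :
    (sums2 (P ++ [p])).count m = (sums2 P).count m + P.count (m - p) := by
  induction P with
  | nil => simp [sums2]
  | cons x Q ih =>
    rw [List.cons_append, sums2, sums2, List.map_append, List.count_append, List.count_append,
      List.count_append, ih, List.count_cons]
    simp only [List.map_cons, List.map_nil, List.count_cons, List.count_nil, beq_iff_eq]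
    by_cases hxm : x + p = m
    · rw [if_pos hxm, if_pos (by omega)]; omega
    · rw [if_neg hxm, if_neg (by omega)]; omega

theorem count_tripsFrom_snoc (x : Int) (Q : List Int) (p m : Int) :
    (tripsFrom x (Q ++ [p])).count m
      = (tripsFrom x Q).count m + (Q.map (fun q => x + q)).count (m - p) := by
  induction Q with
  | nil => simp [tripsFrom]
  | cons q Q' ih =>
    rw [List.cons_append, tripsFrom, tripsFrom, List.map_append, List.count_append,
      List.count_append, List.count_append, ih]
    simp only [List.map_cons, List.map_nil, List.count_cons, List.count_nil, beq_iff_eq]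
    by_cases hxm : x + q + p = m
    · rw [if_pos hxm, if_pos (by omega)]; omega
    · rw [if_neg hxm, if_neg (by omega)]; omega

theorem count_sums3_snoc (P : List Int) (p m : Int) :
    (sums3 (P ++ [p])).count m = (sums3 P).count m + (sums2 P).count (m - p) := by
  induction P with
  | nil => simp [sums3, sums2, tripsFrom]
  | cons x Q ih =>
    rw [List.cons_append, sums3, sums3, List.count_append, List.count_append,
      count_tripsFrom_snoc, ih, sums2, List.count_append]
    omega

-- ---- characterisation of a fold of `res[t] += 1` increments ----
theorem foldl_inc_spec (ts : List Int) : ∀ (init : List Int),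
    (∀ t ∈ ts, 0 ≤ t ∧ t < (init.length : Int)) →
    (ts.foldl pvInc init).length = init.length ∧
      ∀ m : Nat, m < init.length →
        (ts.foldl pvInc init).getD m 0 = init.getD m 0 + (ts.count (m : Int) : Int) := by
  induction ts with
  | nil => intro init _; simp
  | cons t ts ih =>
    intro init hb
    have ht := hb t (by simp)
    have hset : pvInc init t = init.set t.toNat (init.getD t.toNat 0 + 1) := by
      have hget : PySem.List.pyGetD init t 0 = init.getD t.toNat 0 := by
        rw [PySem.List.pyGetD_eq_getElem _ _ ht.1 ht.2, List.getD_eq_getElem _ _ (by omega)]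
      rw [pvInc, PySem.List.pySetD_of_nonneg _ _ ht.1, hget]
    have hlen : (pvInc init t).length = init.length := by rw [hset, List.length_set]
    have hb' : ∀ x ∈ ts, 0 ≤ x ∧ x < ((pvInc init t).length : Int) := by
      intro x hx; rw [hlen]; exact hb x (by simp [hx])
    obtain ⟨ihlen, ihget⟩ := ih (pvInc init t) hb'
    rw [List.foldl_cons]
    refine ⟨by rw [ihlen, hlen], ?_⟩
    intro m hm
    rw [ihget m (by omega), List.count_cons]
    have htn : t.toNat < init.length := by omega
    have hgm : (pvInc init t).getD m 0 =
        if t.toNat = m then init.getD t.toNat 0 + 1 else init.getD m 0 := by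
      rw [hset]
      rw [List.getD_eq_getElem _ _ (by rw [List.length_set]; omega), List.getElem_set]
      split_ifs with h
      · rfl
      · exact (List.getD_eq_getElem _ _ (by omega)).symm
    rw [hgm]
    by_cases hEq : t.toNat = m
    · rw [if_pos hEq, if_pos (by simp [beq_iff_eq]; omega)]
      have : init.getD t.toNat 0 = init.getD m 0 := by rw [hEq]
      rw [this]; push_cast; ring
    · rw [if_neg hEq, if_neg (by simp [beq_iff_eq]; omega)]
      push_cast; ring

-- ---- B side: the three index loops are a fold of increments over sums3 ----
def tailsFold {β : Type} (H : Int → List Int → β → β) : List Int → β → β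
  | [], acc => acc
  | q :: t, acc => tailsFold H t (H q t acc)

theorem foldl_idx_tails {β : Type} (l : List Int) (H : Int → List Int → β → β) :
    ∀ (n : Nat) (c : Int) (acc : β), 0 ≤ c → (l.length : Int) - c ≤ (n : Int) →
    (PySem.List.pyRange c (l.length : Int) 1).foldl
        (fun acc j => H (PySem.List.pyGetD l j 0) (l.drop (j + 1).toNat) acc) acc
      = tailsFold H (l.drop c.toNat) acc := by
  intro n
  induction n with
  | zero =>
    intro c acc hc hn
    rw [PySem.List.pyRange_one_eq_nil (by omega), List.drop_eq_nil_of_le (by omega)]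
    simp [tailsFold]
  | succ n ih =>
    intro c acc hc hn
    by_cases hcl : (l.length : Int) ≤ c
    · rw [PySem.List.pyRange_one_eq_nil (by omega), List.drop_eq_nil_of_le (by omega)]
      simp [tailsFold]
    · have hlt : c.toNat < l.length := by omega
      rw [PySem.List.pyRange_one_cons (by omega), List.foldl_cons]
      have hg : PySem.List.pyGetD l c 0 = l[c.toNat] :=
        PySem.List.pyGetD_eq_getElem l 0 hc (by omega)
      have h2 : (c + 1).toNat = c.toNat + 1 := by omega
      rw [hg, h2, ih (c + 1) _ (by omega) (by omega)]
      have h3 : (c + 1).toNat = c.toNat + 1 := by omega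
      rw [h3, ← List.getElem_cons_drop hlt, tailsFold]

-- ---- sieve correctness: both sieves mark exactly the composites ≤ 1000 ----

-- marking fold: setting a constant at a list of non-negative in-range indices
theorem foldl_set_spec {α : Type} (v d : α) : ∀ (ms : List Int) (arr : List α),
    (∀ x ∈ ms, 0 ≤ x ∧ x < (arr.length : Int)) →
    ((ms.foldl (fun a x => PySem.List.pySetD a x v) arr).length = arr.length ∧
     ∀ i : Nat, i < arr.length →
       (ms.foldl (fun a x => PySem.List.pySetD a x v) arr).getD i d
         = if (i : Int) ∈ ms then v else arr.getD i d) := by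
  intro ms
  induction ms with
  | nil => intro arr _; simp
  | cons x ms ih =>
    intro arr hb
    have hx := hb x (by simp)
    have hset : PySem.List.pySetD arr x v = arr.set x.toNat v :=
      PySem.List.pySetD_of_nonneg _ _ hx.1
    rw [List.foldl_cons]
    have hb' : ∀ y ∈ ms, 0 ≤ y ∧ y < ((PySem.List.pySetD arr x v).length : Int) := by
      intro y hy
      rw [hset, List.length_set]
      exact hb y (by simp [hy])
    obtain ⟨ihlen, ihget⟩ := ih (PySem.List.pySetD arr x v) hb'
    rw [hset, List.length_set] at ihlen
    refine ⟨by rw [hset]; exact ihlen, ?_⟩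
    intro i hi
    rw [ihget i (by rw [hset, List.length_set]; omega)]
    by_cases hmem : (i : Int) ∈ ms
    · rw [if_pos hmem, if_pos (by simp [hmem])]
    · rw [if_neg hmem, hset,
        List.getD_eq_getElem _ _ (by rw [List.length_set]; omega), List.getElem_set]
      by_cases hxi : x.toNat = i
      · rw [if_pos hxi, if_pos (by rw [List.mem_cons]; left; omega)]
      · rw [if_neg hxi,
          if_neg (fun hmm => (List.mem_cons.mp hmm).elim
            (fun h => absurd h (by omega)) hmem),
          List.getD_eq_getElem _ _ (by omega)]

-- number-theoretic bridges
theorem pv_comp_of_prime_dvd {p x : Nat} (hp : p.Prime) (hdvd : p ∣ x) (hlt : p < x) :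
    2 ≤ x ∧ ¬ x.Prime := by
  refine ⟨by have := hp.two_le; omega, ?_⟩
  intro hx
  rcases (hx.eq_one_or_self_of_dvd p hdvd) with h | h
  · exact absurd h hp.one_lt.ne'
  · omega

theorem pv_minFac_facts {x : Nat} (h2 : 2 ≤ x) (hnp : ¬ x.Prime) :
    ∃ p : Nat, p.Prime ∧ p ∣ x ∧ p * p ≤ x ∧ 2 * p ≤ x ∧ p < x := by
  refine ⟨x.minFac, Nat.minFac_prime (by omega), Nat.minFac_dvd x, ?_, ?_, ?_⟩
  · have := Nat.minFac_sq_le_self (by omega) hnp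
    calc x.minFac * x.minFac = x.minFac ^ 2 := by ring
    _ ≤ x := this
  · have hsq : x.minFac * x.minFac ≤ x := by
      have := Nat.minFac_sq_le_self (by omega) hnp
      calc x.minFac * x.minFac = x.minFac ^ 2 := by ring
      _ ≤ x := this
    have h2p := (Nat.minFac_prime (show x ≠ 1 by omega)).two_le
    nlinarith
  · have hsq : x.minFac * x.minFac ≤ x := by
      have := Nat.minFac_sq_le_self (by omega) hnp
      calc x.minFac * x.minFac = x.minFac ^ 2 := by ring
      _ ≤ x := this
    have h2p := (Nat.minFac_prime (show x ≠ 1 by omega)).two_le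
    nlinarith

-- A's sieve
def pvMarkedA (c : Int) (x : Nat) : Prop :=
  ∃ p : Nat, p.Prime ∧ (p : Int) < c ∧ p ∣ x ∧ 2 * p ≤ x

def pvABody (a : List Int) (i : Int) : List Int :=
  if PySem.List.pyGetD a i 0 == 0 then
    (PySem.List.pyRange (i + i) ((1000 : Int) + 1) i).foldl (fun a x => PySem.List.pySetD a x 1) a
  else a

def pvASieve : List Int :=
  (PySem.List.pyRange 2 ((Nat.sqrt (1000 : Int).toNat : Int) + 1) 1).foldl pvABody
    (List.replicate ((1000 : Int) + 1).toNat 0)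

theorem pvASieve_32 : pvASieve
    = (PySem.List.pyRange 2 32 1).foldl pvABody (List.replicate 1001 0) := by
  have hsq : Nat.sqrt (1000 : Int).toNat = 31 := by
    rw [show (1000 : Int).toNat = 1000 from rfl]
    symm
    rw [Nat.eq_sqrt]
    norm_num
  rw [pvASieve, hsq, show (((31 : Nat) : Int) + 1) = 32 by norm_num,
    show ((1000 : Int) + 1).toNat = 1001 from rfl]

def InvSA (c : Int) (arr : List Int) : Prop :=
  arr.length = 1001 ∧ ∀ x : Nat, x < 1001 →
    (pvMarkedA c x → arr.getD x 0 = 1) ∧ (¬ pvMarkedA c x → arr.getD x 0 = 0)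

theorem pv_not_prime_of_markedA {c : Int} {x : Nat} (h : pvMarkedA c x) (hcx : c ≤ (x : Int)) :
    ¬ x.Prime := by
  obtain ⟨p, hp, hpc, hdvd, h2p⟩ := h
  exact (pv_comp_of_prime_dvd hp hdvd (by have := hp.two_le; omega)).2

theorem pvABody_inv {c : Int} {arr : List Int} (hc2 : 2 ≤ c) (hc : c ≤ 31)
    (hInv : InvSA c arr) : InvSA (c + 1) (pvABody arr c) := by
  obtain ⟨hlen, hget⟩ := hInv
  have hcn : c.toNat < 1001 := by omega
  have hcc : ((c.toNat : Nat) : Int) = c := by omega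
  have hgc : PySem.List.pyGetD arr c 0 = arr.getD c.toNat 0 := by
    conv_lhs => rw [← hcc]
    rw [PySem.List.pyGetD_natCast]
  have h1001 : ((1000 : Int) + 1) = 1001 := rfl
  by_cases hM : pvMarkedA c c.toNat
  · -- c already marked: c is composite, the branch is skipped
    have hval : arr.getD c.toNat 0 = 1 := (hget c.toNat hcn).1 hM
    rw [pvABody, h1001, hgc, hval, if_neg (by decide)]
    refine ⟨hlen, ?_⟩
    intro x hx
    have hiff : pvMarkedA (c + 1) x ↔ pvMarkedA c x := by
      constructor
      · rintro ⟨p, hp, hpc, hdvd, h2p⟩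
        by_cases hpc' : (p : Int) = c
        · exfalso
          have : p = c.toNat := by omega
          subst this
          exact (pv_not_prime_of_markedA hM (by omega)) hp
        · exact ⟨p, hp, by omega, hdvd, h2p⟩
      · rintro ⟨p, hp, hpc, hdvd, h2p⟩
        exact ⟨p, hp, by omega, hdvd, h2p⟩
    constructor
    · intro h; exact (hget x hx).1 (hiff.mp h)
    · intro h; exact (hget x hx).2 (fun h' => h (hiff.mpr h'))
  · -- c unmarked: c is prime, mark its multiples from 2c on
    have hprime : Nat.Prime c.toNat := by
      by_contra hnp
      obtain ⟨p, hp, hdvd, _, h2p, hplt⟩ := pv_minFac_facts (by omega) hnp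
      exact hM ⟨p, hp, by omega, hdvd, h2p⟩
    have hval : arr.getD c.toNat 0 = 0 := (hget c.toNat hcn).2 hM
    rw [pvABody, h1001, hgc, hval, if_pos (by decide)]
    have hms : ∀ y ∈ PySem.List.pyRange (c + c) 1001 c, 0 ≤ y ∧ y < (arr.length : Int) := by
      intro y hy
      obtain ⟨h1, h2, _⟩ := (PySem.List.mem_pyRange_iff_of_pos (by omega) y).mp hy
      rw [hlen]
      omega
    obtain ⟨slen, sget⟩ := foldl_set_spec (1 : Int) 0 (PySem.List.pyRange (c + c) 1001 c) arr hms
    refine ⟨by rw [slen, hlen], ?_⟩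
    intro x hx
    have hmem : ((x : Int) ∈ PySem.List.pyRange (c + c) 1001 c)
        ↔ (c + c ≤ (x : Int) ∧ (x : Int) < 1001 ∧ (c ∣ (x : Int))) := by
      rw [PySem.List.mem_pyRange_iff_of_pos (by omega)]
      constructor
      · rintro ⟨h1, h2, h3⟩
        refine ⟨h1, h2, ?_⟩
        have : (x : Int) = ((x : Int) - (c + c)) + (c + c) := by ring
        rw [this]
        exact dvd_add h3 ⟨2, by ring⟩
      · rintro ⟨h1, h2, h3⟩
        exact ⟨h1, h2, (dvd_sub_right h3).mpr ⟨2, by ring⟩⟩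
    rw [sget x (by omega)]
    by_cases hin : (x : Int) ∈ PySem.List.pyRange (c + c) 1001 c
    · rw [if_pos hin]
      obtain ⟨h1, h2, h3⟩ := hmem.mp hin
      have hdvd : c.toNat ∣ x := by
        have := h3
        rw [← hcc] at this
        exact_mod_cast this
      have hmk : pvMarkedA (c + 1) x := ⟨c.toNat, hprime, by omega, hdvd, by omega⟩
      exact ⟨fun _ => rfl, fun h => absurd hmk h⟩
    · rw [if_neg hin]
      have hiff : pvMarkedA (c + 1) x ↔ pvMarkedA c x := by
        constructor
        · rintro ⟨p, hp, hpc, hdvd, h2p⟩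
          by_cases hpc' : (p : Int) = c
          · exfalso
            apply hin
            rw [hmem]
            have hpx : p = c.toNat := by omega
            subst hpx
            refine ⟨by omega, by omega, ?_⟩
            rw [← hcc]
            exact_mod_cast hdvd
          · exact ⟨p, hp, by omega, hdvd, h2p⟩
        · rintro ⟨p, hp, hpc, hdvd, h2p⟩
          exact ⟨p, hp, by omega, hdvd, h2p⟩
      constructor
      · intro h; exact (hget x hx).1 (hiff.mp h)
      · intro h; exact (hget x hx).2 (fun h' => h (hiff.mpr h'))

theorem pvASieve_inv : InvSA 32 pvASieve := by
  have main : ∀ (t : Nat), t ≤ 30 →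
      InvSA (2 + (t : Int))
        ((PySem.List.pyRange 2 (2 + (t : Int)) 1).foldl pvABody (List.replicate 1001 0)) := by
    intro t
    induction t with
    | zero =>
      intro _
      rw [show (2 + ((0 : Nat) : Int)) = 2 by norm_num, PySem.List.pyRange_one_eq_nil le_rfl,
        List.foldl_nil]
      refine ⟨List.length_replicate, ?_⟩
      intro x hx
      constructor
      · rintro ⟨p, hp, hpc, _, _⟩
        have := hp.two_le
        omega
      · intro _
        rw [List.getD_replicate _ (by omega)]
    | succ t ih =>
      intro ht
      have e1 : 2 + ((t + 1 : Nat) : Int) = (2 + (t : Int)) + 1 := by push_cast; ring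
      rw [e1, PySem.List.pyRange_one_succ_right (by omega), List.foldl_append,
        List.foldl_cons, List.foldl_nil]
      exact pvABody_inv (by omega) (by omega) (ih (by omega))
  have h := main 30 le_rfl
  rw [show (2 + ((30 : Nat) : Int)) = 32 by norm_num] at h
  rw [pvASieve_32]
  exact h

-- B's sieve
def pvMarkedB (c : Int) (x : Nat) : Prop :=
  ∃ p : Nat, p.Prime ∧ (p : Int) < c ∧ p ∣ x ∧ p * p ≤ x

def pvBBody (s : List Bool) (i : Int) : List Bool :=
  if PySem.List.pyGetD s i false then
    (PySem.List.pyRange (i * i) 1001 i).foldl (fun s m => PySem.List.pySetD s m false) s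
  else s

def pvBInit : List Bool :=
  PySem.List.pySetD (PySem.List.pySetD (List.replicate 1001 true) 0 false) 1 false

def InvSB (c : Int) (s : List Bool) : Prop :=
  s.length = 1001 ∧ ∀ x : Nat, x < 1001 →
    ((2 ≤ x ∧ ¬ pvMarkedB c x) → s.getD x false = true) ∧
    ((x < 2 ∨ pvMarkedB c x) → s.getD x false = false)

theorem pv_not_prime_of_markedB {c : Int} {x : Nat} (h : pvMarkedB c x) : ¬ x.Prime := by
  obtain ⟨p, hp, hpc, hdvd, hpp⟩ := h
  have h2 := hp.two_le
  exact (pv_comp_of_prime_dvd hp hdvd (by nlinarith)).2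

theorem pvBBody_inv {c : Int} {s : List Bool} (hc2 : 2 ≤ c) (hc : c ≤ 1000)
    (hInv : InvSB c s) : InvSB (c + 1) (pvBBody s c) := by
  obtain ⟨hlen, hget⟩ := hInv
  have hcn : c.toNat < 1001 := by omega
  have hcc : ((c.toNat : Nat) : Int) = c := by omega
  have hgc : PySem.List.pyGetD s c false = s.getD c.toNat false := by
    conv_lhs => rw [← hcc]
    rw [PySem.List.pyGetD_natCast]
  by_cases hM : pvMarkedB c c.toNat
  · -- c composite: cell is false, skip
    have hval : s.getD c.toNat false = false := (hget c.toNat hcn).2 (Or.inr hM)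
    rw [pvBBody, hgc, hval, if_neg (by decide)]
    refine ⟨hlen, ?_⟩
    intro x hx
    have hiff : pvMarkedB (c + 1) x ↔ pvMarkedB c x := by
      constructor
      · rintro ⟨p, hp, hpc, hdvd, hpp⟩
        by_cases hpc' : (p : Int) = c
        · exfalso
          have : p = c.toNat := by omega
          subst this
          exact (pv_not_prime_of_markedB hM) hp
        · exact ⟨p, hp, by omega, hdvd, hpp⟩
      · rintro ⟨p, hp, hpc, hdvd, hpp⟩
        exact ⟨p, hp, by omega, hdvd, hpp⟩
    constructor
    · rintro ⟨h2, h⟩; exact (hget x hx).1 ⟨h2, fun h' => h (hiff.mpr h')⟩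
    · rintro (h | h)
      · exact (hget x hx).2 (Or.inl h)
      · exact (hget x hx).2 (Or.inr (hiff.mp h))
  · -- c prime: mark multiples from c*c on
    have hprime : Nat.Prime c.toNat := by
      by_contra hnp
      obtain ⟨p, hp, hdvd, hpp, _, hplt⟩ := pv_minFac_facts (by omega) hnp
      exact hM ⟨p, hp, by omega, hdvd, hpp⟩
    have hval : s.getD c.toNat false = true := (hget c.toNat hcn).1 ⟨by omega, hM⟩
    rw [pvBBody, hgc, hval, if_pos rfl]
    have hms : ∀ y ∈ PySem.List.pyRange (c * c) 1001 c, 0 ≤ y ∧ y < (s.length : Int) := by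
      intro y hy
      obtain ⟨h1, h2, _⟩ := (PySem.List.mem_pyRange_iff_of_pos (by omega) y).mp hy
      rw [hlen]
      constructor
      · nlinarith
      · omega
    obtain ⟨slen, sget⟩ := foldl_set_spec false false (PySem.List.pyRange (c * c) 1001 c) s hms
    refine ⟨by rw [slen, hlen], ?_⟩
    intro x hx
    have hmem : ((x : Int) ∈ PySem.List.pyRange (c * c) 1001 c)
        ↔ (c * c ≤ (x : Int) ∧ (x : Int) < 1001 ∧ (c ∣ (x : Int))) := by
      rw [PySem.List.mem_pyRange_iff_of_pos (by omega)]
      constructor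
      · rintro ⟨h1, h2, h3⟩
        refine ⟨h1, h2, ?_⟩
        have : (x : Int) = ((x : Int) - c * c) + c * c := by ring
        rw [this]
        exact dvd_add h3 ⟨c, by ring⟩
      · rintro ⟨h1, h2, h3⟩
        exact ⟨h1, h2, (dvd_sub_right h3).mpr ⟨c, by ring⟩⟩
    rw [sget x (by omega)]
    by_cases hin : (x : Int) ∈ PySem.List.pyRange (c * c) 1001 c
    · rw [if_pos hin]
      obtain ⟨h1, h2, h3⟩ := hmem.mp hin
      have hdvd : c.toNat ∣ x := by
        have := h3
        rw [← hcc] at this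
        exact_mod_cast this
      have hmk : pvMarkedB (c + 1) x :=
        ⟨c.toNat, hprime, by omega, hdvd, by rw [← hcc] at h1; exact_mod_cast h1⟩
      exact ⟨fun ⟨_, h⟩ => absurd hmk h, fun _ => rfl⟩
    · rw [if_neg hin]
      have hiff : pvMarkedB (c + 1) x ↔ pvMarkedB c x := by
        constructor
        · rintro ⟨p, hp, hpc, hdvd, hpp⟩
          by_cases hpc' : (p : Int) = c
          · exfalso
            apply hin
            rw [hmem]
            have hpx : p = c.toNat := by omega
            subst hpx
            refine ⟨by rw [← hcc]; exact_mod_cast hpp, by omega, ?_⟩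
            rw [← hcc]
            exact_mod_cast hdvd
          · exact ⟨p, hp, by omega, hdvd, hpp⟩
        · rintro ⟨p, hp, hpc, hdvd, hpp⟩
          exact ⟨p, hp, by omega, hdvd, hpp⟩
      constructor
      · rintro ⟨h2, h⟩; exact (hget x hx).1 ⟨h2, fun h' => h (hiff.mpr h')⟩
      · rintro (h | h)
        · exact (hget x hx).2 (Or.inl h)
        · exact (hget x hx).2 (Or.inr (hiff.mp h))

theorem pvBInit_get : ∀ x : Nat, x < 1001 →
    pvBInit.getD x false = (if x < 2 then false else true) := by
  intro x hx
  rw [pvBInit]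
  rw [show PySem.List.pySetD (List.replicate 1001 true) (0 : Int) false
      = (List.replicate 1001 true).set 0 false from PySem.List.pySetD_of_nonneg _ _ (by omega)]
  rw [show (1 : Int) = ((1 : Nat) : Int) from rfl, PySem.List.pySetD_natCast]
  rw [List.getD_eq_getElem _ _
      (by rw [List.length_set, List.length_set, List.length_replicate]; omega),
    List.getElem_set, List.getElem_set]
  rcases Nat.lt_or_ge x 2 with h | h
  · interval_cases x
    · rw [if_neg (by omega), if_pos rfl, if_pos (by omega)]
    · rw [if_pos rfl, if_pos (by omega)]
  · rw [if_neg (by omega), if_neg (by omega), if_neg (by omega), List.getElem_replicate]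

theorem pvBSieve_inv : InvSB 1001 bSieve := by
  have hb : bSieve = (PySem.List.pyRange 2 1001 1).foldl pvBBody pvBInit := rfl
  have hinit : InvSB 2 pvBInit := by
    refine ⟨by rw [pvBInit, PySem.List.length_pySetD, PySem.List.length_pySetD,
      List.length_replicate], ?_⟩
    intro x hx
    rw [pvBInit_get x hx]
    constructor
    · rintro ⟨h2, _⟩; rw [if_neg (by omega)]
    · rintro (h | ⟨p, hp, hpc, _, _⟩)
      · rw [if_pos h]
      · have := hp.two_le; omega
  have main : ∀ (t : Nat), t ≤ 999 →
      InvSB (2 + (t : Int))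
        ((PySem.List.pyRange 2 (2 + (t : Int)) 1).foldl pvBBody pvBInit) := by
    intro t
    induction t with
    | zero =>
      intro _
      rw [show (2 + ((0 : Nat) : Int)) = 2 by norm_num, PySem.List.pyRange_one_eq_nil le_rfl,
        List.foldl_nil]
      exact hinit
    | succ t ih =>
      intro ht
      have e1 : 2 + ((t + 1 : Nat) : Int) = (2 + (t : Int)) + 1 := by push_cast; ring
      rw [e1, PySem.List.pyRange_one_succ_right (by omega), List.foldl_append,
        List.foldl_cons, List.foldl_nil]
      exact pvBBody_inv (by omega) (by omega) (ih (by omega))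
  have h := main 999 le_rfl
  rw [show (2 + ((999 : Nat) : Int)) = 1001 by norm_num] at h
  rw [hb]
  exact h

-- marked ↔ composite, at the final cutoffs
theorem pv_markedA_final {x : Nat} (hx : x ≤ 1000) :
    pvMarkedA 32 x ↔ (2 ≤ x ∧ ¬ x.Prime) := by
  constructor
  · rintro ⟨p, hp, hpc, hdvd, h2p⟩
    exact pv_comp_of_prime_dvd hp hdvd (by have := hp.two_le; omega)
  · rintro ⟨h2, hnp⟩
    obtain ⟨p, hp, hdvd, hpp, h2p, hplt⟩ := pv_minFac_facts h2 hnp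
    refine ⟨p, hp, ?_, hdvd, h2p⟩
    have : p < 32 := by nlinarith
    omega

theorem pv_markedB_final {x : Nat} (hx : x ≤ 1000) :
    pvMarkedB 1001 x ↔ (2 ≤ x ∧ ¬ x.Prime) := by
  constructor
  · rintro ⟨p, hp, hpc, hdvd, hpp⟩
    have := hp.two_le
    exact pv_comp_of_prime_dvd hp hdvd (by nlinarith)
  · rintro ⟨h2, hnp⟩
    obtain ⟨p, hp, hdvd, hpp, h2p, hplt⟩ := pv_minFac_facts h2 hnp
    refine ⟨p, hp, ?_, hdvd, hpp⟩
    omega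

-- the two prime lists
theorem bPrimes_filter :
    bPrimes = (PySem.List.pyRange 0 1001 1).filter (fun i => PySem.List.pyGetD bSieve i false) := by
  rw [bPrimes]
  rw [PySem.List.foldl_append_if_eq_filter (fun i => PySem.List.pyGetD bSieve i false)
    (PySem.List.pyRange 0 1001 1) []]
  exact List.nil_append _

theorem aPrimes_filter :
    getPrimes 1000 = (PySem.List.pyRange 2 1001 1).filter
      (fun i => PySem.List.pyGetD pvASieve i 0 == 0) := by
  have h : getPrimes 1000 = (PySem.List.pyRange 2 ((1000 : Int) + 1) 1).foldl
      (fun ps i => if PySem.List.pyGetD pvASieve i 0 == 0 then ps ++ [i] else ps) [] := rfl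
  rw [h, show ((1000 : Int) + 1) = 1001 from rfl,
    PySem.List.foldl_append_if_eq_filter (fun i => PySem.List.pyGetD pvASieve i 0 == 0)
    (PySem.List.pyRange 2 1001 1) []]
  exact List.nil_append _

theorem pyRange_1001_pairwise : (PySem.List.pyRange 0 1001 1).Pairwise (· < ·) := by
  rw [show (1001 : Int) = ((1001 : Nat) : Int) by norm_num, PySem.List.pyRange_zero_natCast]
  rw [List.pairwise_map]
  exact List.pairwise_lt_range.imp (by intro a b h; exact_mod_cast h)

theorem bPrimes_pairwise : bPrimes.Pairwise (· < ·) := by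
  rw [bPrimes_filter]
  exact List.Pairwise.filter _ pyRange_1001_pairwise

theorem bPrimes_bounds : ∀ x ∈ bPrimes, (2 : Int) ≤ x ∧ x ≤ 1000 := by
  intro x hx
  rw [bPrimes_filter, List.mem_filter] at hx
  obtain ⟨hmem, hpred⟩ := hx
  obtain ⟨h0, h1⟩ := PySem.List.mem_pyRange_one.mp hmem
  have hxn : x = ((x.toNat : Nat) : Int) := by omega
  refine ⟨?_, by omega⟩
  by_contra hlt
  obtain ⟨_, hchar⟩ := pvBSieve_inv
  have hfalse : bSieve.getD x.toNat false = false :=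
    (hchar x.toNat (by omega)).2 (Or.inl (by omega))
  rw [hxn, PySem.List.pyGetD_natCast, hfalse] at hpred
  exact Bool.false_ne_true hpred

theorem pv_primes_eq : getPrimes 1000 = bPrimes := by
  rw [aPrimes_filter, bPrimes_filter]
  rw [show PySem.List.pyRange 0 1001 1 = PySem.List.pyRange 0 2 1 ++ PySem.List.pyRange 2 1001 1
    from PySem.List.pyRange_one_append 0 2 1001 (by omega) (by omega)]
  rw [List.filter_append]
  obtain ⟨_, hcharB⟩ := pvBSieve_inv
  obtain ⟨_, hcharA⟩ := pvASieve_inv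
  have h01 : (PySem.List.pyRange 0 2 1).filter (fun i => PySem.List.pyGetD bSieve i false) = [] := by
    rw [show PySem.List.pyRange 0 2 1 = [(0 : Int), 1] from rfl]
    have hv0 : bSieve.getD 0 false = false := (hcharB 0 (by omega)).2 (Or.inl (by omega))
    have hv1 : bSieve.getD 1 false = false := (hcharB 1 (by omega)).2 (Or.inl (by omega))
    simp only [List.filter_cons, List.filter_nil]
    rw [show (0 : Int) = ((0 : Nat) : Int) from rfl, show (1 : Int) = ((1 : Nat) : Int) from rfl,
      PySem.List.pyGetD_natCast, PySem.List.pyGetD_natCast, hv0, hv1]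
    rfl
  rw [h01, List.nil_append]
  apply List.filter_congr
  intro x hx
  obtain ⟨h2, h1001⟩ := PySem.List.mem_pyRange_one.mp hx
  have hxn : x = ((x.toNat : Nat) : Int) := by omega
  have hxb : x.toNat < 1001 := by omega
  have hgA : PySem.List.pyGetD pvASieve x 0 = pvASieve.getD x.toNat 0 := by
    conv_lhs => rw [hxn]
    rw [PySem.List.pyGetD_natCast]
  have hgB : PySem.List.pyGetD bSieve x false = bSieve.getD x.toNat false := by
    conv_lhs => rw [hxn]
    rw [PySem.List.pyGetD_natCast]
  rw [hgA, hgB]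
  by_cases hcomp : (2 ≤ x.toNat ∧ ¬ x.toNat.Prime)
  · have hA : pvASieve.getD x.toNat 0 = 1 :=
      (hcharA x.toNat hxb).1 ((pv_markedA_final (by omega)).mpr hcomp)
    have hB : bSieve.getD x.toNat false = false :=
      (hcharB x.toNat hxb).2 (Or.inr ((pv_markedB_final (by omega)).mpr hcomp))
    rw [hA, hB]
    rfl
  · have hA : pvASieve.getD x.toNat 0 = 0 :=
      (hcharA x.toNat hxb).2 (fun h => hcomp ((pv_markedA_final (by omega)).mp h))
    have hB : bSieve.getD x.toNat false = true :=
      (hcharB x.toNat hxb).1 ⟨by omega, fun h => hcomp ((pv_markedB_final (by omega)).mp h)⟩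
    rw [hA, hB]
    rfl

def pvMid (p q : Int) (t2 : List Int) (acc : List Int) : List Int :=
  t2.foldl (fun r v => pvInc r (p + q + v)) acc

def pvOut (p : Int) (t : List Int) (acc : List Int) : List Int :=
  tailsFold (pvMid p) t acc

theorem pvOut_eq_trips (p : Int) : ∀ (t acc : List Int),
    pvOut p t acc = (tripsFrom p t).foldl pvInc acc := by
  intro t
  induction t with
  | nil => intro acc; rfl
  | cons q t2 ih =>
    intro acc
    show tailsFold (pvMid p) t2 (pvMid p q t2 acc) = _
    rw [show tailsFold (pvMid p) t2 (pvMid p q t2 acc) = pvOut p t2 (pvMid p q t2 acc) from rfl,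
      ih, tripsFrom]
    rw [List.foldl_append]
    congr 1
    rw [pvMid, ← List.foldl_map]

theorem tailsFold_pvOut_eq_sums3 : ∀ (l acc : List Int),
    tailsFold pvOut l acc = (sums3 l).foldl pvInc acc := by
  intro l
  induction l with
  | nil => intro acc; rfl
  | cons p t ih =>
    intro acc
    show tailsFold pvOut t (pvOut p t acc) = _
    rw [ih, pvOut_eq_trips, sums3, List.foldl_append]

theorem bTableL_eq : bTableL = (sums3 bPrimes).foldl pvInc (List.replicate 3000 (0 : Int)) := by
  rw [bTableL]
  have houter : ∀ (res : List Int), ∀ i ∈ PySem.List.pyRange 0 (bPrimes.length : Int),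
      (PySem.List.pyRange (i + 1) (bPrimes.length : Int) 1).foldl (fun res j =>
        (PySem.List.pyRange (j + 1) (bPrimes.length : Int) 1).foldl (fun res k =>
          PySem.List.pySetD res
            (PySem.List.pyGetD bPrimes i 0 + PySem.List.pyGetD bPrimes j 0 + PySem.List.pyGetD bPrimes k 0)
            (PySem.List.pyGetD res
              (PySem.List.pyGetD bPrimes i 0 + PySem.List.pyGetD bPrimes j 0 + PySem.List.pyGetD bPrimes k 0) 0 + 1))
          res) res
      = pvOut (PySem.List.pyGetD bPrimes i 0) (bPrimes.drop (i + 1).toNat) res := by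
    intro res i hi
    obtain ⟨hi0, hiL⟩ := PySem.List.mem_pyRange_one.mp hi
    have hmid : ∀ (res : List Int), ∀ j ∈ PySem.List.pyRange (i + 1) (bPrimes.length : Int),
        (PySem.List.pyRange (j + 1) (bPrimes.length : Int) 1).foldl (fun res k =>
          PySem.List.pySetD res
            (PySem.List.pyGetD bPrimes i 0 + PySem.List.pyGetD bPrimes j 0 + PySem.List.pyGetD bPrimes k 0)
            (PySem.List.pyGetD res
              (PySem.List.pyGetD bPrimes i 0 + PySem.List.pyGetD bPrimes j 0 + PySem.List.pyGetD bPrimes k 0) 0 + 1))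
          res
        = pvMid (PySem.List.pyGetD bPrimes i 0) (PySem.List.pyGetD bPrimes j 0) (bPrimes.drop (j + 1).toNat) res := by
      intro res j hj
      obtain ⟨hj0, hjL⟩ := PySem.List.mem_pyRange_one.mp hj
      exact PySem.List.foldl_pyRange_pyGetD' bPrimes 0
        (fun r v => pvInc r (PySem.List.pyGetD bPrimes i 0 + PySem.List.pyGetD bPrimes j 0 + v)) res
        (by omega)
    rw [PySem.List.foldl_congr_mem _ _ _ _ hmid]
    rw [foldl_idx_tails bPrimes (pvMid (PySem.List.pyGetD bPrimes i 0)) bPrimes.length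
      (i + 1) res (by omega) (by omega)]
    rfl
  rw [PySem.List.foldl_congr_mem _ _ _ _ houter]
  rw [foldl_idx_tails bPrimes pvOut bPrimes.length 0 _ (by omega) (by omega)]
  rw [show (0 : Int).toNat = 0 from rfl, List.drop_zero]
  exact tailsFold_pvOut_eq_sums3 bPrimes _

theorem bTableL_spec : bTableL.length = 3000 ∧
    ∀ m : Nat, m < 3000 → bTableL.getD m 0 = ((sums3 bPrimes).count (m : Int) : Int) := by
  rw [bTableL_eq]
  have hb : ∀ t ∈ sums3 bPrimes, (0 : Int) ≤ t ∧ t < ((List.replicate 3000 (0 : Int)).length : Int) := by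
    intro t ht
    have := sums3_bounds bPrimes_pairwise bPrimes_bounds t ht
    simp only [List.length_replicate]
    omega
  obtain ⟨h1, h2⟩ := foldl_inc_spec (sums3 bPrimes) (List.replicate 3000 (0 : Int)) hb
  rw [List.length_replicate] at h1 h2
  refine ⟨h1, ?_⟩
  intro m hm
  rw [h2 m hm, List.getD_replicate _ (by omega)]
  ring

-- ---- A side: one k-loop pass of the DP, characterised pointwise ----
def rowPassL (b : Bool) (P : Int) (src : List Int) (ks : List Int) (dst : List Int) : List Int :=
  ks.foldl (fun d k =>
    if b && P == k then d
    else if PySem.List.pyGetD src k 0 > 0 then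
      PySem.List.pySetD d (k + P) (PySem.List.pyGetD d (k + P) 0 + PySem.List.pyGetD src k 0)
    else d) dst

theorem rowPass_spec (b : Bool) (P : Int) (src : List Int) (hP : 0 < P)
    (hnn : ∀ i : Nat, i < 3000 → 0 ≤ src.getD i 0) :
    ∀ (T : Nat), T ≤ 3000 → ∀ (dst : List Int), dst.length = 3000 →
      (rowPassL b P src (PySem.List.pyRange 0 (T : Int) 1) dst).length = 3000 ∧
      ∀ m : Nat, m < 3000 →
        (rowPassL b P src (PySem.List.pyRange 0 (T : Int) 1) dst).getD m 0
          = dst.getD m 0 +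
            (if (P ≤ (m : Int) ∧ (m : Int) - P < (T : Int) ∧ ¬(b = true ∧ (m : Int) - P = P))
              then src.getD ((m : Int) - P).toNat 0 else 0) := by
  intro T
  induction T with
  | zero =>
    intro _ dst hdst
    rw [Nat.cast_zero, rowPassL, PySem.List.pyRange_one_eq_nil le_rfl, List.foldl_nil]
    refine ⟨hdst, ?_⟩
    intro m hm
    rw [if_neg (by rintro ⟨h1, h2, _⟩; omega)]
    omega
  | succ T ih =>
    intro hT dst hdst
    obtain ⟨plen, pget⟩ := ih (by omega) dst hdst
    have hrange : PySem.List.pyRange 0 ((T + 1 : Nat) : Int) 1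
        = PySem.List.pyRange 0 (T : Nat) 1 ++ [(T : Int)] := by
      push_cast
      exact PySem.List.pyRange_one_succ_right (by omega)
    rw [rowPassL, hrange, List.foldl_append]
    rw [show List.foldl _ dst (PySem.List.pyRange 0 ((T : Nat) : Int) 1)
        = rowPassL b P src (PySem.List.pyRange 0 ((T : Nat) : Int) 1) dst from rfl]
    set prev := rowPassL b P src (PySem.List.pyRange 0 ((T : Nat) : Int) 1) dst with hprev
    rw [List.foldl_cons, List.foldl_nil]
    have hsrcT : PySem.List.pyGetD src ((T : Nat) : Int) 0 = src.getD T 0 :=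
      PySem.List.pyGetD_natCast src T 0
    cases hbk : (b && (P == ((T : Nat) : Int))) with
    | true =>
      -- skipped iteration: P = T and b
      have hb : b = true := by
        cases b with
        | false => simp at hbk
        | true => rfl
      have hPT : P = (T : Int) := by
        have := hbk
        rw [hb] at this
        simpa [beq_iff_eq] using this
      rw [if_pos rfl]
      refine ⟨plen, ?_⟩
      intro m hm
      rw [pget m hm]
      congr 1
      by_cases h1 : P ≤ (m : Int)
      · by_cases h2 : (m : Int) - P = (T : Int)
        · rw [if_neg (by rintro ⟨_, _, hc⟩; exact hc ⟨hb, by omega⟩),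
            if_neg (by rintro ⟨_, _, hc⟩; exact hc ⟨hb, by omega⟩)]
        · by_cases h3 : (m : Int) - P < (T : Int)
          · rw [if_congr (show (P ≤ (m : Int) ∧ (m : Int) - P < (T : Int) ∧ ¬(b = true ∧ (m : Int) - P = P))
                ↔ (P ≤ (m : Int) ∧ (m : Int) - P < ((T + 1 : Nat) : Int) ∧ ¬(b = true ∧ (m : Int) - P = P)) by
              constructor
              · rintro ⟨a, b2, c⟩; exact ⟨a, by omega, c⟩
              · rintro ⟨a, b2, c⟩; exact ⟨a, h3, c⟩) rfl rfl]
          · rw [if_neg (by rintro ⟨_, hlt, _⟩; omega), if_neg (by rintro ⟨_, hlt, _⟩; omega)]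
      · rw [if_neg (by rintro ⟨ha, _, _⟩; exact h1 ha), if_neg (by rintro ⟨ha, _, _⟩; exact h1 ha)]
    | false =>
      have hnbP : ¬(b = true ∧ P = (T : Int)) := by
        intro ⟨h1, h2⟩
        rw [h1] at hbk
        simp at hbk
        exact hbk h2
      rw [if_neg (by simp)]
      by_cases hs : PySem.List.pyGetD src ((T : Nat) : Int) 0 > 0
      · rw [if_pos hs]
        -- the write lands at index T + P
        by_cases hW : (T : Int) + P < 3000
        · have hWn : ((T : Int) + P).toNat < 3000 := by omega
          have hset : PySem.List.pySetD prev ((T : Nat) + P)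
                (PySem.List.pyGetD prev ((T : Nat) + P) 0 + PySem.List.pyGetD src ((T : Nat) : Int) 0)
              = prev.set ((T : Int) + P).toNat
                (prev.getD ((T : Int) + P).toNat 0 + src.getD T 0) := by
            rw [PySem.List.pySetD_of_nonneg _ _ (by omega), hsrcT]
            congr 2
            rw [PySem.List.pyGetD_eq_getElem _ _ (by omega) (by omega),
              List.getD_eq_getElem _ _ (by omega)]
          rw [hset]
          refine ⟨by rw [List.length_set, plen], ?_⟩
          intro m hm
          rw [List.getD_eq_getElem _ _ (by rw [List.length_set, plen]; omega), List.getElem_set]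
          by_cases hmW : ((T : Int) + P).toNat = m
          · rw [if_pos hmW]
            have hm1 : (m : Int) = (T : Int) + P := by omega
            have e1 : ((((T : Int) + P).toNat : Nat) : Int) = (T : Int) + P := by omega
            rw [pget (((T : Int) + P).toNat) (by omega), e1]
            rw [if_neg (by rintro ⟨_, hlt, _⟩; omega)]
            rw [hmW, hm1]
            rw [if_pos ⟨by omega, by omega, fun ⟨hb1, hb2⟩ => hnbP ⟨hb1, by omega⟩⟩]
            have e3 : (((T : Int) + P) - P).toNat = T := by omega
            rw [e3]
            ring
          · rw [if_neg hmW]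
            rw [← List.getD_eq_getElem prev 0 (show m < prev.length by omega), pget m hm]
            congr 1
            have hne : (m : Int) - P ≠ (T : Int) := by omega
            by_cases hcond : P ≤ (m : Int) ∧ (m : Int) - P < (T : Int) ∧ ¬(b = true ∧ (m : Int) - P = P)
            · rw [if_pos hcond, if_pos ⟨hcond.1, by omega, hcond.2.2⟩]
            · rw [if_neg hcond, if_neg (by rintro ⟨h1, h2, h3⟩; exact hcond ⟨h1, by omega, h3⟩)]
        · -- write out of range: Python never reaches this (src vanishes there), the port's set is a no-op
          have hoob : PySem.List.pySet? prev ((T : Nat) + P)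
                (PySem.List.pyGetD prev ((T : Nat) + P) 0 + PySem.List.pyGetD src ((T : Nat) : Int) 0) = none := by
            rw [PySem.List.pySet?_eq_none_iff]
            intro hin
            simp only [PySem.Raise.InRange, plen] at hin
            omega
          rw [show PySem.List.pySetD prev ((T : Nat) + P)
                (PySem.List.pyGetD prev ((T : Nat) + P) 0 + PySem.List.pyGetD src ((T : Nat) : Int) 0)
              = prev from by rw [PySem.List.pySetD, hoob]; rfl]
          refine ⟨plen, ?_⟩
          intro m hm
          rw [pget m hm]
          congr 1
          have hne : (m : Int) - P ≠ (T : Int) := by omega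
          by_cases hcond : P ≤ (m : Int) ∧ (m : Int) - P < (T : Int) ∧ ¬(b = true ∧ (m : Int) - P = P)
          · rw [if_pos hcond, if_pos ⟨hcond.1, by omega, hcond.2.2⟩]
          · rw [if_neg hcond, if_neg (by rintro ⟨h1, h2, h3⟩; exact hcond ⟨h1, by omega, h3⟩)]
      · rw [if_neg hs]
        refine ⟨plen, ?_⟩
        intro m hm
        rw [pget m hm]
        congr 1
        have hz : src.getD T 0 = 0 := by
          have := hnn T (by omega)
          rw [hsrcT] at hs
          omega
        by_cases hmT : (m : Int) - P = (T : Int)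
        · rw [if_neg (by rintro ⟨_, hlt, _⟩; omega)]
          by_cases hcond : P ≤ (m : Int) ∧ (m : Int) - P < ((T : Nat) + 1 : Int) ∧ ¬(b = true ∧ (m : Int) - P = P)
          · rw [if_pos (by push_cast; exact_mod_cast hcond)]
            have e2 : ((m : Int) - P).toNat = T := by omega
            rw [e2, hz]
          · rw [if_neg (by push_cast at hcond ⊢; exact_mod_cast hcond)]
        · by_cases hcond : P ≤ (m : Int) ∧ (m : Int) - P < (T : Int) ∧ ¬(b = true ∧ (m : Int) - P = P)
          · rw [if_pos hcond, if_pos ⟨hcond.1, by omega, hcond.2.2⟩]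
          · rw [if_neg hcond, if_neg (by rintro ⟨h1, h2, h3⟩; exact hcond ⟨h1, by omega, h3⟩)]
-- the body of A's outer loop, as a function of the current prime
def stepAFun (cnt : List (List Int)) (p : Int) : List (List Int) :=
  (PySem.List.pyRange 2 0 (-1)).foldl (fun cnt j =>
    (PySem.List.pyRange 0 3000 1).foldl (fun cnt k =>
      if j == 1 && p == k then cnt
      else if PySem.List.pyGetD (PySem.List.pyGetD cnt j []) k 0 > 0 then
        PySem.List.pySetD cnt (j + 1)
          (PySem.List.pySetD (PySem.List.pyGetD cnt (j + 1) []) (k + p)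
            (PySem.List.pyGetD (PySem.List.pyGetD cnt (j + 1) []) (k + p) 0 +
             PySem.List.pyGetD (PySem.List.pyGetD cnt j []) k 0))
      else cnt) cnt)
    (PySem.List.pySetD cnt 1 (PySem.List.pySetD (PySem.List.pyGetD cnt 1 []) p 1))

theorem kfold2 (p : Int) (r0 r1 r2 : List Int) : ∀ (ks : List Int) (r3 : List Int),
    ks.foldl (fun cnt k =>
      if (2 : Int) == 1 && p == k then cnt
      else if PySem.List.pyGetD (PySem.List.pyGetD cnt 2 []) k 0 > 0 then
        PySem.List.pySetD cnt (2 + 1)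
          (PySem.List.pySetD (PySem.List.pyGetD cnt (2 + 1) []) (k + p)
            (PySem.List.pyGetD (PySem.List.pyGetD cnt (2 + 1) []) (k + p) 0 +
             PySem.List.pyGetD (PySem.List.pyGetD cnt 2 []) k 0))
      else cnt) [r0, r1, r2, r3]
    = [r0, r1, r2, rowPassL false p r2 ks r3] := by
  intro ks
  induction ks with
  | nil => intro r3; rfl
  | cons k ks ih =>
    intro r3
    rw [List.foldl_cons]
    have hbody : (if (2 : Int) == 1 && p == k then [r0, r1, r2, r3]
        else if PySem.List.pyGetD (PySem.List.pyGetD [r0, r1, r2, r3] 2 []) k 0 > 0 then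
          PySem.List.pySetD [r0, r1, r2, r3] (2 + 1)
            (PySem.List.pySetD (PySem.List.pyGetD [r0, r1, r2, r3] (2 + 1) []) (k + p)
              (PySem.List.pyGetD (PySem.List.pyGetD [r0, r1, r2, r3] (2 + 1) []) (k + p) 0 +
               PySem.List.pyGetD (PySem.List.pyGetD [r0, r1, r2, r3] 2 []) k 0))
        else [r0, r1, r2, r3])
        = [r0, r1, r2,
            if PySem.List.pyGetD r2 k 0 > 0 then
              PySem.List.pySetD r3 (k + p) (PySem.List.pyGetD r3 (k + p) 0 + PySem.List.pyGetD r2 k 0)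
            else r3] := by
      show (if PySem.List.pyGetD r2 k 0 > 0 then
          [r0, r1, r2, PySem.List.pySetD r3 (k + p) (PySem.List.pyGetD r3 (k + p) 0 + PySem.List.pyGetD r2 k 0)]
        else [r0, r1, r2, r3]) = _
      split_ifs <;> rfl
    rw [hbody, ih]
    rfl

theorem kfold1 (p : Int) (r0 r1 r3 : List Int) : ∀ (ks : List Int) (r2 : List Int),
    ks.foldl (fun cnt k =>
      if (1 : Int) == 1 && p == k then cnt
      else if PySem.List.pyGetD (PySem.List.pyGetD cnt 1 []) k 0 > 0 then
        PySem.List.pySetD cnt (1 + 1)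
          (PySem.List.pySetD (PySem.List.pyGetD cnt (1 + 1) []) (k + p)
            (PySem.List.pyGetD (PySem.List.pyGetD cnt (1 + 1) []) (k + p) 0 +
             PySem.List.pyGetD (PySem.List.pyGetD cnt 1 []) k 0))
      else cnt) [r0, r1, r2, r3]
    = [r0, r1, rowPassL true p r1 ks r2, r3] := by
  intro ks
  induction ks with
  | nil => intro r2; rfl
  | cons k ks ih =>
    intro r2
    rw [List.foldl_cons]
    have hbody : (if (1 : Int) == 1 && p == k then [r0, r1, r2, r3]
        else if PySem.List.pyGetD (PySem.List.pyGetD [r0, r1, r2, r3] 1 []) k 0 > 0 then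
          PySem.List.pySetD [r0, r1, r2, r3] (1 + 1)
            (PySem.List.pySetD (PySem.List.pyGetD [r0, r1, r2, r3] (1 + 1) []) (k + p)
              (PySem.List.pyGetD (PySem.List.pyGetD [r0, r1, r2, r3] (1 + 1) []) (k + p) 0 +
               PySem.List.pyGetD (PySem.List.pyGetD [r0, r1, r2, r3] 1 []) k 0))
        else [r0, r1, r2, r3])
        = [r0, r1,
            (if p == k then r2
             else if PySem.List.pyGetD r1 k 0 > 0 then
              PySem.List.pySetD r2 (k + p) (PySem.List.pyGetD r2 (k + p) 0 + PySem.List.pyGetD r1 k 0)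
             else r2), r3] := by
      show (if p == k then [r0, r1, r2, r3]
        else if PySem.List.pyGetD r1 k 0 > 0 then
          [r0, r1, PySem.List.pySetD r2 (k + p) (PySem.List.pyGetD r2 (k + p) 0 + PySem.List.pyGetD r1 k 0), r3]
        else [r0, r1, r2, r3]) = _
      split_ifs <;> rfl
    rw [hbody, ih]
    rfl

theorem stepA_rows (p : Int) (r0 r1 r2 r3 : List Int) :
    stepAFun [r0, r1, r2, r3] p
      = [r0, PySem.List.pySetD r1 p 1,
         rowPassL true p (PySem.List.pySetD r1 p 1) (PySem.List.pyRange 0 3000 1) r2,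
         rowPassL false p r2 (PySem.List.pyRange 0 3000 1) r3] := by
  rw [stepAFun]
  rw [show PySem.List.pyRange 2 0 (-1) = [(2 : Int), 1] from rfl]
  simp only [List.foldl_cons, List.foldl_nil]
  rw [show PySem.List.pySetD [r0, r1, r2, r3] 1
      (PySem.List.pySetD (PySem.List.pyGetD [r0, r1, r2, r3] 1 []) p 1)
    = [r0, PySem.List.pySetD r1 p 1, r2, r3] from rfl]
  rw [kfold2 p r0 (PySem.List.pySetD r1 p 1) r2 (PySem.List.pyRange 0 3000 1) r3]
  rw [kfold1 p r0 (PySem.List.pySetD r1 p 1)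
    (rowPassL false p r2 (PySem.List.pyRange 0 3000 1) r3) (PySem.List.pyRange 0 3000 1) r2]

-- the loop invariant of A's DP: the three rows hold the counts of primes,
-- pair sums and triple sums of the processed prefix
def InvRows (Pfx r1 r2 r3 : List Int) : Prop :=
  r1.length = 3000 ∧ r2.length = 3000 ∧ r3.length = 3000 ∧
  (∀ m : Nat, m < 3000 → r1.getD m 0 = (Pfx.count (m : Int) : Int)) ∧
  (∀ m : Nat, m < 3000 → r2.getD m 0 = ((sums2 Pfx).count (m : Int) : Int)) ∧
  (∀ m : Nat, m < 3000 → r3.getD m 0 = ((sums3 Pfx).count (m : Int) : Int))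

theorem stepA_spec (Pfx : List Int) (p : Int) (hp2 : 2 ≤ p) (hp1000 : p ≤ 1000)
    (hpnot : p ∉ Pfx) (hPfxb : ∀ x ∈ Pfx, (2 : Int) ≤ x ∧ x ≤ 1000)
    (hpair : Pfx.Pairwise (· < ·)) (r1 r2 r3 : List Int)
    (hInv : InvRows Pfx r1 r2 r3) :
    InvRows (Pfx ++ [p]) (PySem.List.pySetD r1 p 1)
      (rowPassL true p (PySem.List.pySetD r1 p 1) (PySem.List.pyRange 0 3000 1) r2)
      (rowPassL false p r2 (PySem.List.pyRange 0 3000 1) r3) := by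
  obtain ⟨hl1, hl2, hl3, hg1, hg2, hg3⟩ := hInv
  have hset1 : PySem.List.pySetD r1 p 1 = r1.set p.toNat 1 :=
    PySem.List.pySetD_of_nonneg _ _ (by omega)
  have hl1' : (PySem.List.pySetD r1 p 1).length = 3000 := by
    rw [hset1, List.length_set, hl1]
  have hg1' : ∀ m : Nat, m < 3000 →
      (PySem.List.pySetD r1 p 1).getD m 0 = (((Pfx ++ [p]).count (m : Int) : Nat) : Int) := by
    intro m hm
    rw [hset1, List.getD_eq_getElem _ _ (by rw [List.length_set, hl1]; omega), List.getElem_set]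
    rw [List.count_append]
    by_cases hpm : p.toNat = m
    · have hpm' : p = (m : Int) := by omega
      rw [if_pos hpm]
      have : Pfx.count ((m : Int)) = 0 := by
        rw [List.count_eq_zero]
        rw [← hpm']
        exact hpnot
      rw [this]
      simp [hpm']
    · rw [if_neg hpm, ← List.getD_eq_getElem _ _ (by omega), hg1 m hm]
      have : ([p].count ((m : Int))) = 0 := by
        simp [List.count_singleton, beq_iff_eq]
        omega
      rw [this]
      norm_num
  -- characterise the j = 2 pass (writes row 3 from row 2)
  have hnn2 : ∀ i : Nat, i < 3000 → 0 ≤ r2.getD i 0 := by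
    intro i hi; rw [hg2 i hi]; exact Int.natCast_nonneg _
  have h3000 : ((3000 : Nat) : Int) = (3000 : Int) := by norm_num
  obtain ⟨hl3', hg3'⟩ := by
    have h := rowPass_spec false p r2 (by omega) hnn2 3000 le_rfl r3 hl3
    rw [h3000] at h
    exact h
  have hg3'' : ∀ m : Nat, m < 3000 →
      (rowPassL false p r2 (PySem.List.pyRange 0 3000 1) r3).getD m 0
        = (((sums3 (Pfx ++ [p])).count ((m : Int)) : Nat) : Int) := by
    intro m hm
    rw [hg3' m hm, hg3 m hm, count_sums3_snoc]
    push_cast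
    by_cases hc : p ≤ (m : Int)
    · rw [if_pos ⟨hc, by omega, by rintro ⟨h, _⟩; exact absurd h (by simp)⟩]
      have e : (((m : Int) - p).toNat : Int) = (m : Int) - p := by omega
      rw [hg2 ((m : Int) - p).toNat (by omega), e]
    · rw [if_neg (by rintro ⟨h, _, _⟩; exact hc h)]
      have : ((sums2 Pfx).count ((m : Int) - p)) = 0 := by
        rw [List.count_eq_zero]
        intro hmem
        have := sums2_bounds hpair hPfxb _ hmem
        omega
      rw [this]
      norm_num
  -- characterise the j = 1 pass (writes row 2 from the updated row 1)
  have hnn1 : ∀ i : Nat, i < 3000 → 0 ≤ (PySem.List.pySetD r1 p 1).getD i 0 := by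
    intro i hi; rw [hg1' i hi]; exact Int.natCast_nonneg _
  obtain ⟨hl2', hg2'⟩ := by
    have h := rowPass_spec true p (PySem.List.pySetD r1 p 1) (by omega) hnn1 3000 le_rfl r2 hl2
    rw [h3000] at h
    exact h
  have hg2'' : ∀ m : Nat, m < 3000 →
      (rowPassL true p (PySem.List.pySetD r1 p 1) (PySem.List.pyRange 0 3000 1) r2).getD m 0
        = (((sums2 (Pfx ++ [p])).count ((m : Int)) : Nat) : Int) := by
    intro m hm
    rw [hg2' m hm, hg2 m hm, count_sums2_snoc]
    push_cast
    by_cases hc : p ≤ (m : Int)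
    · by_cases heq : (m : Int) - p = p
      · rw [if_neg (by rintro ⟨_, _, hne⟩; exact hne ⟨rfl, heq⟩)]
        have : (Pfx.count ((m : Int) - p)) = 0 := by
          rw [List.count_eq_zero, heq]
          exact hpnot
        rw [this]
        norm_num
      · rw [if_pos ⟨hc, by omega, by rintro ⟨_, h2⟩; exact heq h2⟩]
        have hlt : ((m : Int) - p).toNat < 3000 := by omega
        have e : (((m : Int) - p).toNat : Int) = (m : Int) - p := by omega
        rw [hg1' ((m : Int) - p).toNat hlt, e, List.count_append]
        have : ([p].count ((m : Int) - p)) = 0 := by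
          simp [List.count_singleton, beq_iff_eq]
          omega
        rw [this]
        norm_num
    · rw [if_neg (by rintro ⟨h, _, _⟩; exact hc h)]
      have : (Pfx.count ((m : Int) - p)) = 0 := by
        rw [List.count_eq_zero]
        intro hmem
        have := hPfxb _ hmem
        omega
      rw [this]
      norm_num
  exact ⟨hl1', hl2', hl3', hg1', hg2'', hg3''⟩

set_option maxRecDepth 8000 in
theorem foldA_inv : ∀ (suf Pfx : List Int), Pfx ++ suf = bPrimes →
    ∀ (r0 r1 r2 r3 : List Int), InvRows Pfx r1 r2 r3 →
    ∃ s1 s2 s3, suf.foldl stepAFun [r0, r1, r2, r3] = [r0, s1, s2, s3] ∧ InvRows bPrimes s1 s2 s3 := by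
  intro suf
  induction suf with
  | nil =>
    intro Pfx happ r0 r1 r2 r3 hInv
    rw [List.append_nil] at happ
    refine ⟨r1, r2, r3, rfl, ?_⟩
    rw [← happ]
    exact hInv
  | cons p suf ih =>
    intro Pfx happ r0 r1 r2 r3 hInv
    have hpmem : p ∈ bPrimes := by rw [← happ]; simp
    have hpb := bPrimes_bounds p hpmem
    have hnd : (Pfx ++ p :: suf).Nodup := by
      rw [happ]
      exact (bPrimes_pairwise.imp (fun h => ne_of_lt h))
    have hpnot : p ∉ Pfx := by
      intro hp
      have hdisj := (List.nodup_append.mp hnd).2.2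
      exact hdisj p hp p (by simp) rfl
    have hsub : Pfx.Sublist bPrimes := by
      rw [← happ]
      exact (Pfx.sublist_append_left (p :: suf))
    have hpair : Pfx.Pairwise (· < ·) := List.Pairwise.sublist hsub bPrimes_pairwise
    have hPfxb : ∀ x ∈ Pfx, (2 : Int) ≤ x ∧ x ≤ 1000 := fun x hx =>
      bPrimes_bounds x (hsub.mem hx)
    rw [List.foldl_cons, stepA_rows]
    exact ih (Pfx ++ [p]) (by rw [← happ]; simp) r0 _ _ _
      (stepA_spec Pfx p hpb.1 hpb.2 hpnot hPfxb hpair r1 r2 r3 hInv)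

set_option maxRecDepth 8000 in
theorem aCntL_eq : ∃ s1 s2 s3,
    aCntL = [List.replicate 3000 (0 : Int), s1, s2, s3] ∧ InvRows bPrimes s1 s2 s3 := by
  have h1 : aCntL = List.foldl (fun cnt i => stepAFun cnt (PySem.List.pyGetD (getPrimes 1000) i 0))
      (List.replicate 4 (List.replicate 3000 (0 : Int)))
      (PySem.List.pyRange 0 ((getPrimes 1000).length : Int) 1) := rfl
  rw [h1, PySem.List.foldl_pyRange_pyGetD' (getPrimes 1000) 0 stepAFun _ (by omega)]
  rw [show (0 : Int).toNat = 0 from rfl, List.drop_zero, pv_primes_eq]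
  rw [show List.replicate 4 (List.replicate 3000 (0 : Int))
    = [List.replicate 3000 (0 : Int), List.replicate 3000 (0 : Int),
       List.replicate 3000 (0 : Int), List.replicate 3000 (0 : Int)] from rfl]
  refine foldA_inv bPrimes [] (List.nil_append bPrimes) _ _ _ _ ?_
  refine ⟨List.length_replicate, List.length_replicate, List.length_replicate, ?_, ?_, ?_⟩ <;>
    · intro m hm
      rw [List.getD_replicate _ (by omega)]
      simp [sums2, sums3]

-- ===== VERDICT (by name: the statement is the Claim_ definition above) =====
theorem solution_spec : Claim_equal_solution := by
  intro n hdom hpre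
  unfold Spec_solution
  obtain ⟨s1, s2, s3, hA, hInv⟩ := aCntL_eq
  obtain ⟨hl1, hl2, hl3, hg1, hg2, hg3⟩ := hInv
  obtain ⟨hbl, hbg⟩ := bTableL_spec
  have hs3 : s3 = bTableL := by
    apply List.ext_getElem (by rw [hl3, hbl])
    intro i h1 h2
    rw [← List.getD_eq_getElem s3 0 h1, ← List.getD_eq_getElem bTableL 0 h2]
    rw [hg3 i (by omega), hbg i (by rw [hbl] at h2; omega)]
  show solution n = solution_alt n
  unfold solution solution_alt
  have hrow3 : (PySem.List.pyGetD aCnt 3 #[]).toList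
      = PySem.List.pyGetD aCntL 3 [] := by
    rw [← aCnt_map_toList, show ([] : List Int) = Array.toList #[] from rfl,
      PySem.List.pyGetD_map]
  rw [hrow3, bTable_toList, hA,
    show PySem.List.pyGetD [List.replicate 3000 (0 : Int), s1, s2, s3] 3 [] = s3 from rfl, hs3]
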